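-- pv_equiv track=rewrite | github.com/bigzzodev/sdemo | analytics/dashboard_company.py | _extract_year_data
-- ===== SOURCE A (Python) =====
-- def _extract_year_data(_year, _data):
--     class_keys = ["class_INSURANCE", "class_BUSINESS", "class_ESG", "class_COMPLIANCE", "class_ORGANIZATION", "class_MARKET", "class_TECHINNOV", "class_SPORTS", "class_AD", "class_NO"]
--     year_data = {class_name: [0] * 12 for class_name in class_keys}
--     for entry in _data:
--         for month, info in entry.items():
--             entry_year, entry_month = month.split("-")
--             if entry_year == _year:
--                 month_index = int(entry_month) - 1
--                 for class_name in class_keys: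
--                     year_data[class_name][month_index] = info["class_counts"].get(class_name, 0)
--     data_list = [year_data[class_name][::-1] for class_name in class_keys]
--     return data_list
-- ===== SOURCE B (Python) =====
-- def _extract_year_data(_year, _data):
--     class_keys = ["class_INSURANCE", "class_BUSINESS", "class_ESG", "class_COMPLIANCE", "class_ORGANIZATION", "class_MARKET", "class_TECHINNOV", "class_SPORTS", "class_AD", "class_NO"]
--     idx = {}
--     for entry in _data:
--         for month, info in entry.items():
--             entry_year, entry_month = month.split("-")
--             if entry_year == _year:
--                 idx[int(entry_month)] = info
--     return [[idx[m]["class_counts"].get(class_name, 0) if m in idx else 0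
--              for m in range(12, 0, -1)]
--             for class_name in class_keys]
-- ===== Notes on version B (the rewrite author's own statement) =====
-- stated objective: alternative
-- what changed: B replaces A's per-item loop that writes all 10 class slots into a dict of 12-cell lists (then reverses each) by one pass building a month->info index (last matching entry wins) and then reading months 12..1 directly per class, producing the reversed rows without mutation or a final [::-1].
-- intended difference: On inputs whose last month key with int value 0 or 12 for the requested year is a '<_year>-<m>' key with int(m) = 0 whose counts differ on some class from the last true month-12 entry's, A reports that month-0 entry's counts as December (month_index -1 wraps into the December slot) while B reports the month-12 data (or 0); B's value is the intended one since month 0 names no month of the year. — e.g. on _extract_year_data("2024", [[("2024-0", [("class_counts", [("class_NO", 1)])])]]): A returns [[0, 0, 0, 0, 0, 0, 0, 0, 0, 0, 0, 0], [0, 0, 0, 0, 0, 0, 0, 0, 0, 0, 0, 0], [0, 0, 0, 0, 0, 0, 0, 0, 0, 0, 0, 0], [0, …, B returns [[0, 0, 0, 0, 0, 0, 0, 0, 0, 0, 0, 0], [0, 0, 0, 0, 0, 0, 0, 0, 0, 0, 0, 0], [0, 0, 0, 0, 0, 0, 0, 0, 0, 0, 0, 0], [0, …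
import Mathlib
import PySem

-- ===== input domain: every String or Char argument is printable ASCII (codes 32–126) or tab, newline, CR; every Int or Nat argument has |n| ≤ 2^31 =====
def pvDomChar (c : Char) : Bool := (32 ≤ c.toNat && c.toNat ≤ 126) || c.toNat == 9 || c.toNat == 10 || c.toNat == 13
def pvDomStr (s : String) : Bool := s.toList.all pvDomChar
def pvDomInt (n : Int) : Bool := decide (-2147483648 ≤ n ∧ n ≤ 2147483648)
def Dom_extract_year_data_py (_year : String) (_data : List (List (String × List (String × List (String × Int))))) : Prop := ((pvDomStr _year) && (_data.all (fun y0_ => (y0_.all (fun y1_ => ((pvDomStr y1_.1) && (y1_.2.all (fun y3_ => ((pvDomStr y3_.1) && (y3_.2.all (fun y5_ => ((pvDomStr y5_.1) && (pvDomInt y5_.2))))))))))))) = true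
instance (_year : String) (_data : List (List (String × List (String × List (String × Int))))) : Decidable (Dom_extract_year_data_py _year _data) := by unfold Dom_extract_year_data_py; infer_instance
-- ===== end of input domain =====

-- B (one pass building a month→info index, then reading months 12..1 per class) replaces A's
-- per-item 10-key write loop plus final reversals: objective 'alternative' (same asymptotic cost).

-- the fixed class_keys literal (appears verbatim in both Python sources)
def pvClassKeys : List String := ["class_INSURANCE", "class_BUSINESS", "class_ESG", "class_COMPLIANCE", "class_ORGANIZATION", "class_MARKET", "class_TECHINNOV", "class_SPORTS", "class_AD", "class_NO"]

-- info["class_counts"].get(class_name, 0) — a subexpression both Python sources contain verbatim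
def pvCnt (info : List (String × List (String × Int))) (class_name : String) : Int :=
  match (PySem.Dict.ofList info).get? "class_counts" with
  | some cc => (PySem.Dict.ofList cc).getD class_name 0
  | none => 0   -- missing "class_counts" is a KeyError in Python: excluded by Pre_

-- the month-key parse both Python sources perform verbatim on each item:
-- entry_year, entry_month = month.split("-"); if entry_year == _year: int(entry_month)
-- (none where the source raises — excluded by Pre_ — or where the year does not match)
def pvMonth (_year : String) (mi : String × List (String × List (String × Int))) : Option Int :=
  match PySem.Str.split? mi.1 "-" with
  | some [entry_year, entry_month] =>
    if entry_year == _year then PySem.Int.ofStr? entry_month else none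
  | _ => none

-- ===== PORT A =====
-- body of A's inner `for month, info in entry.items():` loop
def pvStepA (_year : String) (yd : PySem.Dict String (List Int))
    (mi : String × List (String × List (String × Int))) : PySem.Dict String (List Int) :=
  match pvMonth _year mi with
  | some n =>
    let month_index : Int := n - 1
    pvClassKeys.foldl (fun yd class_name =>
      yd.insert class_name
        (PySem.List.pySetD (yd.getD class_name []) month_index (pvCnt mi.2 class_name))) yd
  | none => yd   -- year mismatch: skipped (the raising parses are excluded by Pre_)

def extract_year_data_py (_year : String) (_data : List (List (String × List (String × List (String × Int))))) : List (List Int) :=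
  let year_data0 : PySem.Dict String (List Int) :=
    pvClassKeys.foldl (fun d class_name => d.insert class_name (List.replicate 12 (0 : Int))) PySem.Dict.empty
  let year_data :=
    _data.foldl (fun yd entry => (PySem.Dict.ofList entry).items.foldl (pvStepA _year) yd) year_data0
  -- year_data[class_name][::-1] is List.reverse (PySem.List.slice?_none_none_neg_one)
  pvClassKeys.map (fun class_name => (year_data.getD class_name []).reverse)

-- ===== PORT B =====
-- body of B's inner loop: idx[int(entry_month)] = info for matching-year keys
def pvStepB (_year : String) (idx : PySem.Dict Int (List (String × List (String × Int))))
    (mi : String × List (String × List (String × Int))) : PySem.Dict Int (List (String × List (String × Int))) :=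
  match pvMonth _year mi with
  | some m => idx.insert m mi.2
  | none => idx   -- year mismatch: skipped (the raising parses are excluded by Pre_)

def extract_year_data_py_alt (_year : String) (_data : List (List (String × List (String × List (String × Int))))) : List (List Int) :=
  let idx : PySem.Dict Int (List (String × List (String × Int))) :=
    _data.foldl (fun idx entry => (PySem.Dict.ofList entry).items.foldl (pvStepB _year) idx) PySem.Dict.empty
  pvClassKeys.map (fun class_name =>
    (PySem.List.pyRange 12 0 (-1)).map (fun m =>
      match idx.get? m with
      | some info => pvCnt info class_name
      | none => 0))

-- ===== PRECONDITION & SPEC =====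
-- an item (month key, info) A processes without raising: the key splits into exactly two parts,
-- and if its year part matches, the month part parses with int value in 0..12 (≥13 is an
-- IndexError in A) and info has the "class_counts" key (else KeyError in A)
def pvGoodItem (_year : String) (mi : String × List (String × List (String × Int))) : Bool :=
  ((PySem.Str.split? mi.1 "-").getD []).length == 2 &&
    ((((PySem.Str.split? mi.1 "-").getD []).getD 0 "" != _year) ||
      (match PySem.Int.ofStr? (((PySem.Str.split? mi.1 "-").getD []).getD 1 "") with
       | some n => decide (0 ≤ n) && decide (n ≤ 12) && (PySem.Dict.ofList mi.2).contains "class_counts"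
       | none => false))

-- Pre_ excludes exactly the inputs where A raises: a month key that does not split into two parts
-- or whose matching-year month part fails int() (ValueError), int month ≥ 13 (IndexError on list
-- assignment), or a matching-year info without "class_counts" (KeyError). Int month 0 stays inside
-- Pre_ (A returns there); it is covered by D_ below.
def Pre_extract_year_data_py (_year : String) (_data : List (List (String × List (String × List (String × Int))))) : Prop :=
  ∀ entry ∈ _data, ∀ mi ∈ (PySem.Dict.ofList entry).items, pvGoodItem _year mi = true
instance (_year : String) (_data : List (List (String × List (String × List (String × Int))))) : Decidable (Pre_extract_year_data_py _year _data) := by unfold Pre_extract_year_data_py; infer_instance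

def pvWitness_extract_year_data_py : String × (List (List (String × List (String × List (String × Int))))) :=
  ("2024", [[("2024-7", [("class_counts", [("class_NO", 2)])]), ("2023-7", [("class_counts", [("class_AD", 1)])])]])


-- On inputs whose last month key with int value 0 or 12 for _year is a "<_year>-<m>" key with
-- int(m) = 0 whose counts differ from the last true month-12 entry's on some class, A reports that
-- month-0 entry's counts as December (month_index -1 wraps into the December slot), while B reports
-- the month-12 data (or 0); B's value is the intended one since month 0 names no month of the year.
def D_extract_year_data_py (_year : String) (_data : List (List (String × List (String × List (String × Int))))) : Prop :=
  (let L := (_data.flatMap (fun entry => (PySem.Dict.ofList entry).items)).reverse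
   match L.find? (fun mi => pvMonth _year mi == some 12 || pvMonth _year mi == some 0) with
   | some z => (pvMonth _year z == some 0) && pvClassKeys.any (fun k =>
       pvCnt z.2 k != (L.find? (fun mi => pvMonth _year mi == some 12)).elim 0 (fun w => pvCnt w.2 k))
   | none => false) = true
instance (_year : String) (_data : List (List (String × List (String × List (String × Int))))) : Decidable (D_extract_year_data_py _year _data) := by unfold D_extract_year_data_py; infer_instance

def Spec_extract_year_data_py (_year : String) (_data : List (List (String × List (String × List (String × Int))))) (out : List (List Int)) : Prop := ¬ D_extract_year_data_py _year _data → out = extract_year_data_py_alt _year _data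
instance (_year : String) (_data : List (List (String × List (String × List (String × Int))))) (out : List (List Int)) : Decidable (Spec_extract_year_data_py _year _data out) := by unfold Spec_extract_year_data_py; infer_instance

def pvDiffWitness_extract_year_data_py : String × (List (List (String × List (String × List (String × Int))))) :=
  ("2024", [[("2024-0", [("class_counts", [("class_NO", 1)])])]])

def pvDiffWitnessOut_extract_year_data_py : (List (List Int)) × (List (List Int)) :=
  ([[0, 0, 0, 0, 0, 0, 0, 0, 0, 0, 0, 0], [0, 0, 0, 0, 0, 0, 0, 0, 0, 0, 0, 0],
    [0, 0, 0, 0, 0, 0, 0, 0, 0, 0, 0, 0], [0, 0, 0, 0, 0, 0, 0, 0, 0, 0, 0, 0],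
    [0, 0, 0, 0, 0, 0, 0, 0, 0, 0, 0, 0], [0, 0, 0, 0, 0, 0, 0, 0, 0, 0, 0, 0],
    [0, 0, 0, 0, 0, 0, 0, 0, 0, 0, 0, 0], [0, 0, 0, 0, 0, 0, 0, 0, 0, 0, 0, 0],
    [0, 0, 0, 0, 0, 0, 0, 0, 0, 0, 0, 0], [1, 0, 0, 0, 0, 0, 0, 0, 0, 0, 0, 0]],
   [[0, 0, 0, 0, 0, 0, 0, 0, 0, 0, 0, 0], [0, 0, 0, 0, 0, 0, 0, 0, 0, 0, 0, 0],
    [0, 0, 0, 0, 0, 0, 0, 0, 0, 0, 0, 0], [0, 0, 0, 0, 0, 0, 0, 0, 0, 0, 0, 0],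
    [0, 0, 0, 0, 0, 0, 0, 0, 0, 0, 0, 0], [0, 0, 0, 0, 0, 0, 0, 0, 0, 0, 0, 0],
    [0, 0, 0, 0, 0, 0, 0, 0, 0, 0, 0, 0], [0, 0, 0, 0, 0, 0, 0, 0, 0, 0, 0, 0],
    [0, 0, 0, 0, 0, 0, 0, 0, 0, 0, 0, 0], [0, 0, 0, 0, 0, 0, 0, 0, 0, 0, 0, 0]])

-- ===== CLAIM (what is proved, stated in full; the proofs are below) =====
def Claim_unchanged_extract_year_data_py : Prop := ∀ (_year : String) (_data : List (List (String × List (String × List (String × Int))))), Dom_extract_year_data_py _year _data → Pre_extract_year_data_py _year _data → Spec_extract_year_data_py _year _data (extract_year_data_py _year _data)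
def Claim_changed_extract_year_data_py : Prop := Dom_extract_year_data_py (pvDiffWitness_extract_year_data_py.1) (pvDiffWitness_extract_year_data_py.2) ∧ Pre_extract_year_data_py (pvDiffWitness_extract_year_data_py.1) (pvDiffWitness_extract_year_data_py.2) ∧ D_extract_year_data_py (pvDiffWitness_extract_year_data_py.1) (pvDiffWitness_extract_year_data_py.2) ∧ extract_year_data_py (pvDiffWitness_extract_year_data_py.1) (pvDiffWitness_extract_year_data_py.2) = pvDiffWitnessOut_extract_year_data_py.1 ∧ extract_year_data_py_alt (pvDiffWitness_extract_year_data_py.1) (pvDiffWitness_extract_year_data_py.2) = pvDiffWitnessOut_extract_year_data_py.2 ∧ pvDiffWitnessOut_extract_year_data_py.1 ≠ pvDiffWitnessOut_extract_year_data_py.2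
def Claim_exact_extract_year_data_py : Prop := ∀ (_year : String) (_data : List (List (String × List (String × List (String × Int))))), Dom_extract_year_data_py _year _data → Pre_extract_year_data_py _year _data → D_extract_year_data_py _year _data → extract_year_data_py _year _data ≠ extract_year_data_py_alt _year _data

-- ===== LEMMAS AND PROOFS =====

-- the flat stream of (month key, info) items, in iteration order
def pvItems (_data : List (List (String × List (String × List (String × Int))))) :
    List (String × List (String × List (String × Int))) :=
  _data.flatMap (fun entry => (PySem.Dict.ofList entry).items)

-- last-match selector over a flat stream
def pvSelFold (P : String × List (String × List (String × Int)) → Bool)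
    (L : List (String × List (String × List (String × Int))))
    (a : Option (String × List (String × List (String × Int)))) :
    Option (String × List (String × List (String × Int))) :=
  L.foldl (fun acc mi => if P mi then some mi else acc) a


lemma pvSelFold_acc (P : String × List (String × List (String × Int)) → Bool)
    (L : List (String × List (String × List (String × Int))))
    (a : Option (String × List (String × List (String × Int)))) :
    pvSelFold P L a = (pvSelFold P L none).or a := by
  induction L generalizing a with
  | nil => simp [pvSelFold]
  | cons x L ih =>
    simp only [pvSelFold, List.foldl_cons] at *
    rw [ih, ih (if P x then some x else none)]
    cases P x
    · simp
    · simp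

lemma pvSelFold_cons (P : String × List (String × List (String × Int)) → Bool)
    (x : String × List (String × List (String × Int)))
    (L : List (String × List (String × List (String × Int)))) :
    pvSelFold P (x :: L) none = (pvSelFold P L none).or (if P x then some x else none) := by
  simp only [pvSelFold, List.foldl_cons]
  exact pvSelFold_acc P L _

lemma pvSelFold_eq_none_iff (P : String × List (String × List (String × Int)) → Bool)
    (L : List (String × List (String × List (String × Int)))) :
    pvSelFold P L none = none ↔ ∀ mi ∈ L, P mi = false := by
  induction L with
  | nil => simp [pvSelFold]
  | cons x L ih =>
    rw [pvSelFold_cons, Option.or_eq_none_iff]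
    constructor
    · rintro ⟨h1, h2⟩
      intro mi hmi
      rcases List.mem_cons.mp hmi with rfl | hmi
      · cases hx : P mi
        · rfl
        · rw [hx] at h2; simp at h2
      · exact ih.mp h1 mi hmi
    · intro h
      refine ⟨ih.mpr (fun mi hmi => h mi (List.mem_cons_of_mem _ hmi)), ?_⟩
      simp [h x List.mem_cons_self]

lemma pvSelFold_mono (P Q : String × List (String × List (String × Int)) → Bool)
    (L : List (String × List (String × List (String × Int))))
    (z : String × List (String × List (String × Int)))
    (hPz : pvSelFold P L none = some z)
    (hQP : ∀ mi, Q mi = true → P mi = true)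
    (hQz : Q z = true) : pvSelFold Q L none = some z := by
  induction L with
  | nil => simp [pvSelFold] at hPz
  | cons x L ih =>
    rw [pvSelFold_cons] at hPz ⊢
    rcases hw : pvSelFold P L none with _ | w
    · rw [hw] at hPz
      simp only [Option.none_or] at hPz
      have hLnone : pvSelFold Q L none = none :=
        (pvSelFold_eq_none_iff Q L).mpr (fun mi hmi => by
          have hp := (pvSelFold_eq_none_iff P L).mp hw mi hmi
          cases hq : Q mi
          · rfl
          · rw [hQP mi hq] at hp; exact absurd hp (by simp))
      rw [hLnone, Option.none_or]
      cases hx : P x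
      · rw [hx] at hPz; simp at hPz
      · rw [hx] at hPz
        simp only [if_true] at hPz
        cases hPz
        rw [hQz]
        rfl
    · rw [hw] at hPz
      simp only [Option.some_or] at hPz
      cases hPz
      rw [ih hw, Option.some_or]

lemma pvSelFold_some_prop (P : String × List (String × List (String × Int)) → Bool)
    (L : List (String × List (String × List (String × Int))))
    (z : String × List (String × List (String × Int)))
    (h : pvSelFold P L none = some z) : P z = true := by
  induction L with
  | nil => simp [pvSelFold] at h
  | cons x L ih =>
    rw [pvSelFold_cons] at h
    rcases hw : pvSelFold P L none with _ | w
    · rw [hw, Option.none_or] at h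
      cases hx : P x
      · rw [hx] at h; simp at h
      · rw [hx] at h
        have hxz : x = z := by simpa using h
        exact hxz ▸ hx
    · rw [hw, Option.some_or] at h; cases h; exact ih hw

lemma pvFoldWrite (mi : Int) (info : List (String × List (String × Int)))
    (ks : List String) (hnd : ks.Nodup) (yd : PySem.Dict String (List Int)) (x : String) :
    (ks.foldl (fun yd class_name =>
        yd.insert class_name
          (PySem.List.pySetD (yd.getD class_name []) mi (pvCnt info class_name))) yd).getD x []
      = if x ∈ ks then PySem.List.pySetD (yd.getD x []) mi (pvCnt info x) else yd.getD x [] := by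
  induction ks generalizing yd with
  | nil => simp
  | cons k ks ih =>
    rcases List.nodup_cons.mp hnd with ⟨hk, hnd'⟩
    simp only [List.foldl_cons, ih hnd']
    by_cases hx : x ∈ ks
    · have hne : x ≠ k := fun h => hk (h ▸ hx)
      simp [PySem.Dict.getD_insert, hne, hx]
    · by_cases hxk : x = k
      · subst hxk; simp [hx]
      · simp [PySem.Dict.getD_insert, hx, hxk]

-- the item's key names month m of _year
def pvSel (_year : String) (m : Int) (mi : String × List (String × List (String × Int))) : Bool :=
  pvMonth _year mi == some m

lemma pvSelFold_eq_find (P : String × List (String × List (String × Int)) → Bool)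
    (L : List (String × List (String × List (String × Int)))) :
    pvSelFold P L none = L.reverse.find? P := by
  induction L with
  | nil => rfl
  | cons x L ih =>
    rw [pvSelFold_cons, List.reverse_cons, List.find?_append, ih]
    rcases L.reverse.find? P with _ | w
    · simp only [Option.none_or]
      cases hx : P x <;> simp [List.find?, hx]
    · rfl

-- which 0-based slot j of A's 12-cell list an item writes (month j+1, or month 0 wrapping to slot 11)
def pvWr (_year : String) (j : Nat) (mi : String × List (String × List (String × Int))) : Bool :=
  pvSel _year ((j : Int) + 1) mi || (j == 11 && pvSel _year 0 mi)

lemma pvSetD_neg_one (xs : List Int) (v : Int) (hl : xs.length = 12) :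
    PySem.List.pySetD xs (-1) v = xs.set 11 v := by
  simp [PySem.List.pySetD, PySem.List.pySet?, PySem.List.pyIdx?, hl]

lemma pvMonth_bounds (_year : String) (mi : String × List (String × List (String × Int)))
    (hg : pvGoodItem _year mi = true) (n : Int) (hm : pvMonth _year mi = some n) :
    0 ≤ n ∧ n ≤ 12 := by
  unfold pvGoodItem at hg
  unfold pvMonth at hm
  cases hp : PySem.Str.split? mi.1 "-" with
  | none => rw [hp] at hm; exact absurd hm (by simp)
  | some parts =>
    rw [hp] at hg hm
    simp only [Option.getD_some, Bool.and_eq_true, beq_iff_eq] at hg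
    obtain ⟨a, b, rfl⟩ := List.length_eq_two.mp hg.1
    simp only at hm
    cases hy' : a == _year with
    | false => rw [hy'] at hm; exact absurd hm (by simp)
    | true =>
      have ha : a = _year := beq_iff_eq.mp hy'
      rw [hy'] at hm
      simp only [if_pos] at hm
      simp only [List.getD_cons_zero, List.getD_cons_succ, ha, bne_self_eq_false,
        Bool.false_or] at hg
      rw [hm] at hg
      simp only [Bool.and_eq_true, decide_eq_true_eq] at hg
      exact ⟨hg.2.1.1, hg.2.1.2⟩

lemma pvStepA_slots (_year : String) (mi : String × List (String × List (String × Int)))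
    (hg : pvGoodItem _year mi = true) (yd : PySem.Dict String (List Int))
    (hy : ∀ k ∈ pvClassKeys, (yd.getD k []).length = 12) :
    ∀ k ∈ pvClassKeys, ((pvStepA _year yd mi).getD k []).length = 12 ∧
      ∀ j : Nat, j < 12 → ((pvStepA _year yd mi).getD k []).getD j 0 =
        if pvWr _year j mi then pvCnt mi.2 k else (yd.getD k []).getD j 0 := by
  unfold pvStepA
  cases hm : pvMonth _year mi with
  | none =>
    intro k hk
    refine ⟨hy k hk, ?_⟩
    intro j hj
    simp [pvWr, pvSel, hm]
  | some n =>
    obtain ⟨hn0, h12⟩ := pvMonth_bounds _year mi hg n hm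
    intro k hk
    have hlen := hy k hk
    rw [pvFoldWrite (n - 1) mi.2 pvClassKeys (by decide) yd k]
    simp only [hk, if_true]
    have hsel : ∀ m : Int, pvSel _year m mi = (n == m) := by
      intro m
      simp [pvSel, hm]
    by_cases hzero : n = 0
    · subst hzero
      rw [show (0 : Int) - 1 = -1 by norm_num, pvSetD_neg_one _ _ hlen]
      refine ⟨by simp [hlen], ?_⟩
      intro j hj
      have hwr : pvWr _year j mi = (j == 11) := by
        simp [pvWr, hsel]
        omega
      rw [hwr]
      by_cases hj11 : j = 11
      · subst hj11
        rw [List.getD_eq_getElem _ _ (by simp [hlen] : 11 < (List.set (yd.getD k []) 11 (pvCnt mi.2 k)).length)]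
        rw [List.getElem_set]
        simp
      · have : (j == 11) = false := by simp [hj11]
        rw [this]
        simp only [Bool.false_eq_true, ite_false]
        rw [List.getD_eq_getElem _ _ (by simp [hlen, hj] : j < (List.set (yd.getD k []) 11 (pvCnt mi.2 k)).length)]
        rw [List.getElem_set, if_neg (by omega : ¬ (11 = j))]
        rw [List.getD_eq_getElem _ _ (by omega : j < (yd.getD k []).length)]
    · rw [PySem.List.pySetD_of_nonneg (yd.getD k []) (pvCnt mi.2 k) (by omega : (0:Int) ≤ n - 1)]
      refine ⟨by simp [hlen], ?_⟩
      intro j hj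
      have hwr : pvWr _year j mi = (n == (j : Int) + 1) := by
        simp [pvWr, hsel]
        omega
      rw [hwr]
      by_cases hc : n = (j : Int) + 1
      · have hij : (n - 1).toNat = j := by omega
        rw [if_pos (by simp [hc]), hij]
        rw [List.getD_eq_getElem _ _ (by simp [hlen, hj] : j < (List.set (yd.getD k []) j (pvCnt mi.2 k)).length)]
        rw [List.getElem_set]
        simp
      · have hne : (n - 1).toNat ≠ j := by omega
        rw [if_neg (by simp [hc])]
        rcases Nat.lt_or_ge ((n - 1).toNat) (yd.getD k []).length with hin | hout
        · rw [List.getD_eq_getElem _ _ (by simp [hlen, hj] : j < (List.set (yd.getD k []) (n - 1).toNat (pvCnt mi.2 k)).length)]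
          rw [List.getElem_set, if_neg hne]
          rw [List.getD_eq_getElem _ _ (by omega : j < (yd.getD k []).length)]
        · rw [List.set_eq_of_length_le (by omega)]

lemma pvFoldA_slots (_year : String) (L : List (String × List (String × List (String × Int))))
    (hgood : ∀ mi ∈ L, pvGoodItem _year mi = true) (yd : PySem.Dict String (List Int))
    (hy : ∀ k ∈ pvClassKeys, (yd.getD k []).length = 12) :
    ∀ k ∈ pvClassKeys, ((L.foldl (pvStepA _year) yd).getD k []).length = 12 ∧
      ∀ j : Nat, j < 12 → ((L.foldl (pvStepA _year) yd).getD k []).getD j 0 =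
        match pvSelFold (pvWr _year j) L none with
        | some w => pvCnt w.2 k
        | none => (yd.getD k []).getD j 0 := by
  induction L generalizing yd with
  | nil =>
    intro k hk
    exact ⟨hy k hk, fun j _ => rfl⟩
  | cons mi L ih =>
    have hstep := pvStepA_slots _year mi (hgood mi List.mem_cons_self) yd hy
    have hy' : ∀ k ∈ pvClassKeys, ((pvStepA _year yd mi).getD k []).length = 12 :=
      fun k hk => (hstep k hk).1
    have ihs := ih (fun a ha => hgood a (List.mem_cons_of_mem _ ha)) (pvStepA _year yd mi) hy'
    intro k hk
    simp only [List.foldl_cons]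
    refine ⟨(ihs k hk).1, ?_⟩
    intro j hj
    rw [(ihs k hk).2 j hj, pvSelFold_cons]
    rcases hw : pvSelFold (pvWr _year j) L none with _ | w
    · simp only [Option.none_or]
      rw [(hstep k hk).2 j hj]
      cases pvWr _year j mi <;> simp
    · rfl

lemma pvStepB_look (_year : String) (idx : PySem.Dict Int (List (String × List (String × Int))))
    (mi : String × List (String × List (String × Int))) (m : Int) (k : String) :
    (match (pvStepB _year idx mi).get? m with
     | some info => pvCnt info k
     | none => 0) =
    if pvSel _year m mi then pvCnt mi.2 k
    else (match idx.get? m with | some info => pvCnt info k | none => 0) := by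
  unfold pvStepB
  cases hm : pvMonth _year mi with
  | none => simp [pvSel, hm]
  | some n =>
    have hsel : pvSel _year m mi = (n == m) := by simp [pvSel, hm]
    rw [hsel, PySem.Dict.get?_insert]
    by_cases hc : m = n
    · simp [hc]
    · simp only [if_neg hc]
      rw [beq_eq_false_iff_ne.mpr (Ne.symm hc)]
      simp

lemma pvFoldB_look (_year : String) (L : List (String × List (String × List (String × Int))))
    (idx : PySem.Dict Int (List (String × List (String × Int)))) (m : Int) (k : String) :
    (match (L.foldl (pvStepB _year) idx).get? m with
     | some info => pvCnt info k
     | none => 0) =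
    match pvSelFold (pvSel _year m) L none with
    | some w => pvCnt w.2 k
    | none => (match idx.get? m with | some info => pvCnt info k | none => 0) := by
  induction L generalizing idx with
  | nil => rfl
  | cons mi L ih =>
    simp only [List.foldl_cons]
    rw [ih (pvStepB _year idx mi), pvSelFold_cons]
    rcases hw : pvSelFold (pvSel _year m) L none with _ | w
    · simp only [Option.none_or]
      rw [pvStepB_look]
      cases pvSel _year m mi <;> simp
    · rfl

-- A's initial year_data dict
def pvInit : PySem.Dict String (List Int) :=
  pvClassKeys.foldl (fun d class_name => d.insert class_name (List.replicate 12 (0 : Int)))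
    PySem.Dict.empty

lemma pvInit_getD : ∀ k ∈ pvClassKeys, pvInit.getD k [] = List.replicate 12 (0 : Int) := by decide

lemma pvInit_len : ∀ k ∈ pvClassKeys, (pvInit.getD k []).length = 12 := by
  intro k hk
  rw [pvInit_getD k hk]
  simp

lemma pvPortA_rows (_year : String) (_data : List (List (String × List (String × List (String × Int))))) :
    extract_year_data_py _year _data =
      pvClassKeys.map (fun k => (((pvItems _data).foldl (pvStepA _year) pvInit).getD k []).reverse) := by
  simp only [extract_year_data_py, pvInit, pvItems, List.foldl_flatMap]

lemma pvPortB_rows (_year : String) (_data : List (List (String × List (String × List (String × Int))))) :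
    extract_year_data_py_alt _year _data =
      pvClassKeys.map (fun k => (PySem.List.pyRange 12 0 (-1)).map (fun m =>
        match ((pvItems _data).foldl (pvStepB _year) PySem.Dict.empty).get? m with
        | some info => pvCnt info k
        | none => 0)) := by
  simp only [extract_year_data_py_alt, pvItems, List.foldl_flatMap]

lemma pvWr_eq_sel (_year : String) (i : Nat) (hi1 : 1 ≤ i) (hi : i < 12) :
    pvWr _year (11 - i) = pvSel _year (12 - (i : Int)) := by
  funext mi
  have h11 : ((11 - i) == 11) = false := by
    rw [beq_eq_false_iff_ne]
    omega
  have hc : ((11 - i : Nat) : Int) + 1 = 12 - (i : Int) := by omega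
  simp [pvWr, h11, hc]

lemma pvWr11_eta (_year : String) :
    pvWr _year 11 = (fun mi => pvMonth _year mi == some 12 || pvMonth _year mi == some 0) := by
  funext mi
  norm_num [pvWr, pvSel]

lemma pvSel12_eta (_year : String) :
    pvSel _year 12 = (fun mi => pvMonth _year mi == some 12) := rfl

lemma pvGoods (_year : String) (_data : List (List (String × List (String × List (String × Int)))))
    (hpre : Pre_extract_year_data_py _year _data) :
    ∀ mi ∈ pvItems _data, pvGoodItem _year mi = true := by
  intro mi hmi
  rcases List.mem_flatMap.mp hmi with ⟨e, he, hmie⟩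
  exact hpre e he mi hmie

-- ===== VERDICT (by name: the statement is the Claim_ definition above) =====
theorem extract_year_data_py_spec : Claim_unchanged_extract_year_data_py := by
  intro _year _data _hdom hpre hnd
  simp only [D_extract_year_data_py] at hnd
  rw [← pvSelFold_eq_find, ← pvSelFold_eq_find] at hnd
  have hdd : (match pvSelFold (fun mi => pvMonth _year mi == some 12 || pvMonth _year mi == some 0)
        (pvItems _data) none with
      | some z => (pvMonth _year z == some 0) && pvClassKeys.any (fun k =>
          pvCnt z.2 k != (pvSelFold (fun mi => pvMonth _year mi == some 12)
            (pvItems _data) none).elim 0 (fun w => pvCnt w.2 k))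
      | none => false) = false := by
    cases h : (match pvSelFold (fun mi => pvMonth _year mi == some 12 || pvMonth _year mi == some 0)
        (pvItems _data) none with
      | some z => (pvMonth _year z == some 0) && pvClassKeys.any (fun k =>
          pvCnt z.2 k != (pvSelFold (fun mi => pvMonth _year mi == some 12)
            (pvItems _data) none).elim 0 (fun w => pvCnt w.2 k))
      | none => false)
    · rfl
    · exact absurd h hnd
  rw [pvPortA_rows, pvPortB_rows]
  refine List.map_congr_left (fun k hk => ?_)
  obtain ⟨hlen, hslots⟩ :=
    pvFoldA_slots _year (pvItems _data) (pvGoods _year _data hpre) pvInit pvInit_len k hk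
  rw [PySem.List.pyRange_neg_one, show ((12 : Int) - 0).toNat = 12 by decide, List.map_map]
  apply List.ext_getElem
  · simp [hlen]
  · intro i h1 h2
    have hi : i < 12 := by simpa using h2
    have hL : (((pvItems _data).foldl (pvStepA _year) pvInit).getD k []).reverse[i]'h1
        = (((pvItems _data).foldl (pvStepA _year) pvInit).getD k []).getD (11 - i) 0 := by
      rw [List.getElem_reverse]
      rw [List.getD_eq_getElem _ _ (by omega : 11 - i < (((pvItems _data).foldl (pvStepA _year) pvInit).getD k []).length)]
      congr 1
      omega
    rw [hL, hslots (11 - i) (by omega)]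
    rw [List.getElem_map, List.getElem_range]
    simp only [Function.comp]
    rw [pvFoldB_look]
    by_cases hi0 : i = 0
    · subst hi0
      rw [pvWr11_eta]
      norm_num
      rw [pvSel12_eta]
      rcases hz : pvSelFold (fun mi => pvMonth _year mi == some 12 || pvMonth _year mi == some 0)
          (pvItems _data) none with _ | z
      · have hz12 : pvSelFold (fun mi => pvMonth _year mi == some 12) (pvItems _data) none = none :=
          (pvSelFold_eq_none_iff _ _).mpr (fun mi hmi => by
            have h0 := (pvSelFold_eq_none_iff _ _).mp hz mi hmi
            cases hq : (pvMonth _year mi == some 12)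
            · rfl
            · rw [hq] at h0; simp at h0)
        rw [hz12, pvInit_getD k hk]
        simp
      · rw [hz] at hdd
        simp only at hdd
        by_cases hz0 : (pvMonth _year z == some 0) = true
        · rw [hz0, Bool.true_and] at hdd
          have hall := List.any_eq_false.mp hdd k hk
          rcases ht : pvSelFold (fun mi => pvMonth _year mi == some 12) (pvItems _data) none with _ | w
          · rw [ht] at hall
            simpa using hall
          · rw [ht] at hall
            simpa using hall
        · have hz0f : (pvMonth _year z == some 0) = false := by
            cases h : (pvMonth _year z == some 0)
            · rfl
            · exact absurd h hz0
          have hz12sel : (pvMonth _year z == some 12) = true := by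
            have hPz := pvSelFold_some_prop _ _ _ hz
            rw [hz0f] at hPz
            simpa using hPz
          have h12 : pvSelFold (fun mi => pvMonth _year mi == some 12) (pvItems _data) none = some z :=
            pvSelFold_mono _ _ _ z hz (fun mi hq => by rw [hq]; rfl) hz12sel
          rw [h12]
    · rw [pvWr_eq_sel _year i (by omega) hi]
      rcases hv : pvSelFold (pvSel _year (12 - (i : Int))) (pvItems _data) none with _ | w
      · rw [pvInit_getD k hk, List.getD_replicate _ (by omega : 11 - i < 12)]
        simp [PySem.Dict.get?_empty]
      · rfl

theorem extract_year_data_py_changed : Claim_changed_extract_year_data_py := by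
  unfold Claim_changed_extract_year_data_py
  refine ⟨by decide, by decide, by decide, by decide, by decide, by decide⟩

theorem extract_year_data_py_tight : Claim_exact_extract_year_data_py := by
  intro _year _data _hdom hpre hd heq
  simp only [D_extract_year_data_py] at hd
  rw [← pvSelFold_eq_find, ← pvSelFold_eq_find] at hd
  have hd2 : (match pvSelFold (fun mi => pvMonth _year mi == some 12 || pvMonth _year mi == some 0)
        (pvItems _data) none with
      | some z => (pvMonth _year z == some 0) && pvClassKeys.any (fun k =>
          pvCnt z.2 k != (pvSelFold (fun mi => pvMonth _year mi == some 12)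
            (pvItems _data) none).elim 0 (fun w => pvCnt w.2 k))
      | none => false) = true := hd
  rcases hz : pvSelFold (fun mi => pvMonth _year mi == some 12 || pvMonth _year mi == some 0)
      (pvItems _data) none with _ | z
  · rw [hz] at hd2; simp at hd2
  · rw [hz] at hd2
    simp only [Bool.and_eq_true, List.any_eq_true, bne_iff_ne] at hd2
    obtain ⟨hz0, k0, hk0, hne⟩ := hd2
    obtain ⟨hlen, hslots⟩ :=
      pvFoldA_slots _year (pvItems _data) (pvGoods _year _data hpre) pvInit pvInit_len k0 hk0
    have h1 := congrArg (fun out => (out.getD (pvClassKeys.idxOf k0) []).getD 0 0) heq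
    rw [pvPortA_rows, pvPortB_rows] at h1
    simp only at h1
    have hidx : pvClassKeys.idxOf k0 < pvClassKeys.length := List.idxOf_lt_length_of_mem hk0
    have hgetA : (pvClassKeys.map (fun k => (((pvItems _data).foldl (pvStepA _year) pvInit).getD k []).reverse)).getD (pvClassKeys.idxOf k0) []
        = (((pvItems _data).foldl (pvStepA _year) pvInit).getD k0 []).reverse := by
      rw [List.getD_eq_getElem _ _ (by simpa using hidx)]
      rw [List.getElem_map, List.getElem_idxOf]
    have hgetB : (pvClassKeys.map (fun k => (PySem.List.pyRange 12 0 (-1)).map (fun m =>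
          match ((pvItems _data).foldl (pvStepB _year) PySem.Dict.empty).get? m with
          | some info => pvCnt info k
          | none => 0))).getD (pvClassKeys.idxOf k0) []
        = (PySem.List.pyRange 12 0 (-1)).map (fun m =>
          match ((pvItems _data).foldl (pvStepB _year) PySem.Dict.empty).get? m with
          | some info => pvCnt info k0
          | none => 0) := by
      rw [List.getD_eq_getElem _ _ (by simpa using hidx)]
      rw [List.getElem_map, List.getElem_idxOf]
    rw [hgetA, hgetB] at h1
    have hs11 := hslots 11 (by omega)
    rw [pvWr11_eta, hz] at hs11
    have hA0 : ((((pvItems _data).foldl (pvStepA _year) pvInit).getD k0 []).reverse).getD 0 0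
        = pvCnt z.2 k0 := by
      rw [List.getD_eq_getElem _ _ (by simp [hlen] : 0 < ((((pvItems _data).foldl (pvStepA _year) pvInit).getD k0 []).reverse).length)]
      rw [List.getElem_reverse]
      rw [← List.getD_eq_getElem _ 0 (by omega : (((pvItems _data).foldl (pvStepA _year) pvInit).getD k0 []).length - 1 - 0 < (((pvItems _data).foldl (pvStepA _year) pvInit).getD k0 []).length)]
      rw [show (((pvItems _data).foldl (pvStepA _year) pvInit).getD k0 []).length - 1 - 0 = 11 from by omega]
      exact hs11
    have hB0 : ((PySem.List.pyRange 12 0 (-1)).map (fun m =>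
          match ((pvItems _data).foldl (pvStepB _year) PySem.Dict.empty).get? m with
          | some info => pvCnt info k0
          | none => 0)).getD 0 0
        = (pvSelFold (fun mi => pvMonth _year mi == some 12) (pvItems _data) none).elim 0
            (fun w => pvCnt w.2 k0) := by
      rw [PySem.List.pyRange_neg_one, show ((12 : Int) - 0).toNat = 12 by decide, List.map_map]
      rw [List.getD_eq_getElem _ _ (by simp)]
      rw [List.getElem_map, List.getElem_range]
      simp only [Function.comp]
      rw [pvFoldB_look]
      norm_num [PySem.Dict.get?_empty]
      rw [pvSel12_eta]
      rcases pvSelFold (fun mi => pvMonth _year mi == some 12) (pvItems _data) none with _ | w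
      · rfl
      · rfl
    rw [hA0, hB0] at h1
    exact hne h1
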